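-- pv_equiv track=rewrite | github.com/delphython/gb_python_tasks | seminar5/task2.py | get_increasing_sequence
-- ===== SOURCE A (Python) =====
-- def get_increasing_sequence(input_list):
--     output_list = []
--     tmp_list = []
--
--     input_list_len = len(input_list)
--
--     for i in range(input_list_len):
--         if i < input_list_len - 1 and input_list[i] <= input_list[i+1]:
--             tmp_list.append(input_list[i])
--         else:
--             tmp_list.append(input_list[i])
--             if len(tmp_list) > 1:
--                 output_list.append(tmp_list)
--             tmp_list = []
--
--     return output_list
-- ===== SOURCE B (Python) =====
-- def get_increasing_sequence(input_list):
--     n = len(input_list)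
--     # pass 1: cut positions — one past each index where the order strictly drops
--     bounds = [i + 1 for i in range(n - 1) if input_list[i] > input_list[i + 1]]
--     # pass 2: slice the list at the cut positions, keep segments longer than 1
--     out = []
--     start = 0
--     for b in bounds + [n]:
--         if b - start > 1:
--             out.append(input_list[start:b])
--         start = b
--     return out
-- ===== Notes on version B (the rewrite author's own statement) =====
-- stated objective: alternative
-- what changed: Replaces the single accumulate-and-flush pass carrying a temporary run list with two passes: first collect the cut positions (indices where the order strictly drops), then slice the input at those positions and keep slices longer than 1.
import Mathlib
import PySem

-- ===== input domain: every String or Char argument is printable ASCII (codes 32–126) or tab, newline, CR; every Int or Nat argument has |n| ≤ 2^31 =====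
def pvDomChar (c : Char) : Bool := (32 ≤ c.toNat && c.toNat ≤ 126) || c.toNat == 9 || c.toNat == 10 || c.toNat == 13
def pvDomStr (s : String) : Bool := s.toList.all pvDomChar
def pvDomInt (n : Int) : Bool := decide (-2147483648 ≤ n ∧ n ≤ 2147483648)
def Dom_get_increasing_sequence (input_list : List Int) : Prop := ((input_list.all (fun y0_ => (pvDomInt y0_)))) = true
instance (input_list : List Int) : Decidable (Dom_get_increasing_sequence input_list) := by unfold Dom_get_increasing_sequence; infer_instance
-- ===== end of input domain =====

-- B replaces A's accumulate-and-flush single pass by two passes: collect the cut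
-- positions where the order strictly drops, then slice and keep slices longer than 1
-- (alternative decomposition, same cost).

-- ===== PORT A =====
def aStep (xs : List Int) (n : Int) (st : List (List Int) × List Int) (i : Int) :
    List (List Int) × List Int :=
  if i < n - 1 ∧ PySem.List.pyGetD xs i 0 ≤ PySem.List.pyGetD xs (i + 1) 0 then
    (st.1, st.2 ++ [PySem.List.pyGetD xs i 0])
  else
    let tmp := st.2 ++ [PySem.List.pyGetD xs i 0]
    (if tmp.length > 1 then st.1 ++ [tmp] else st.1, [])

def get_increasing_sequence (input_list : List Int) : List (List Int) :=
  let n : Int := input_list.length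
  ((PySem.List.pyRange 0 n 1).foldl (aStep input_list n) ([], [])).1

-- ===== PORT B =====
def bStep (xs : List Int) (st : List (List Int) × Int) (b : Int) : List (List Int) × Int :=
  (if b - st.2 > 1 then st.1 ++ [PySem.List.slice xs (some st.2) (some b)] else st.1, b)

def get_increasing_sequence_alt (input_list : List Int) : List (List Int) :=
  let n : Int := input_list.length
  let bounds := ((PySem.List.pyRange 0 (n - 1) 1).filter
      (fun i => decide (PySem.List.pyGetD input_list (i + 1) 0 < PySem.List.pyGetD input_list i 0))).map
      (· + 1)
  ((bounds ++ [n]).foldl (bStep input_list) ([], 0)).1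

-- ===== PRECONDITION & SPEC =====
def Spec_get_increasing_sequence (input_list : List Int) (out : List (List Int)) : Prop := out = get_increasing_sequence_alt input_list
instance (input_list : List Int) (out : List (List Int)) : Decidable (Spec_get_increasing_sequence input_list out) := by unfold Spec_get_increasing_sequence; infer_instance

-- ===== CLAIM (what is proved, stated in full; the proofs are below) =====
def Claim_equal_get_increasing_sequence : Prop := ∀ (input_list : List Int), Dom_get_increasing_sequence input_list → Spec_get_increasing_sequence input_list (get_increasing_sequence input_list)

-- ===== LEMMAS AND PROOFS =====

-- splitRun x rest = (maximal non-decreasing run starting at x, remainder)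
def splitRun (x : Int) : List Int → List Int × List Int
  | [] => ([x], [])
  | y :: rest =>
    if x ≤ y then
      let p := splitRun y rest
      (x :: p.1, p.2)
    else ([x], y :: rest)

theorem splitRun_snd_length_le (rest : List Int) : ∀ x, (splitRun x rest).2.length ≤ rest.length := by
  induction rest with
  | nil => intro x; simp [splitRun]
  | cons y rest ih =>
    intro x
    by_cases h : x ≤ y <;> simp [splitRun, h]
    exact le_trans (ih y) (Nat.le_succ _)

theorem splitRun_append (rest : List Int) : ∀ x, (splitRun x rest).1 ++ (splitRun x rest).2 = x :: rest := by
  induction rest with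
  | nil => intro x; simp [splitRun]
  | cons y rest ih =>
    intro x
    by_cases h : x ≤ y <;> simp [splitRun, h, ih y]

-- the runs spec: peel one maximal run at a time
def runsSpec : List Int → List (List Int)
  | [] => []
  | x :: rest =>
    let p := splitRun x rest
    (if p.1.length > 1 then [p.1] else []) ++ runsSpec p.2
termination_by xs => xs.length
decreasing_by
  simpa using Nat.lt_succ_of_le (splitRun_snd_length_le rest x)

-- structural form of A's loop body (tmp = pending run)
def gLoop (t : List Int) : List Int → List (List Int)
  | [] => []
  | [x] => if (t ++ [x]).length > 1 then [t ++ [x]] else []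
  | x :: y :: rest =>
    if x ≤ y then gLoop (t ++ [x]) (y :: rest)
    else (if (t ++ [x]).length > 1 then [t ++ [x]] else []) ++ gLoop [] (y :: rest)

theorem gLoop_eq (rest : List Int) : ∀ x t, gLoop t (x :: rest) =
    (if (t ++ (splitRun x rest).1).length > 1 then [t ++ (splitRun x rest).1] else []) ++
      runsSpec (splitRun x rest).2 := by
  induction rest with
  | nil => intro x t; simp [gLoop, splitRun, runsSpec]
  | cons y rest ih =>
    intro x t
    by_cases h : x ≤ y
    · rw [show gLoop t (x :: y :: rest) = gLoop (t ++ [x]) (y :: rest) from by simp [gLoop, h]]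
      rw [ih y (t ++ [x])]
      simp [splitRun, h]
    · rw [show gLoop t (x :: y :: rest) =
          (if (t ++ [x]).length > 1 then [t ++ [x]] else []) ++ gLoop [] (y :: rest) from by
        simp [gLoop, h]]
      rw [ih y []]
      rw [show runsSpec (splitRun x (y :: rest)).2 = runsSpec (y :: rest) from by simp [splitRun, h]]
      rw [show (splitRun x (y :: rest)).1 = [x] from by simp [splitRun, h]]
      conv_rhs => rw [runsSpec]
      simp

theorem getD_append_add (pre suf : List Int) (x : Int) (k : Nat) (d : Int) :
    (pre ++ x :: suf).getD (pre.length + k) d = (x :: suf).getD k d := by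
  simp [List.getD, List.getElem?_append_right]

-- A's indexed loop equals gLoop
theorem aLoop_eq (suf : List Int) : ∀ (pre : List Int) out tmp,
    ((PySem.List.pyRange (pre.length : Int) (((pre ++ suf).length : Nat) : Int) 1).foldl
      (aStep (pre ++ suf) (((pre ++ suf).length : Nat) : Int)) (out, tmp)).1 = out ++ gLoop tmp suf := by
  induction suf with
  | nil =>
    intro pre out tmp
    rw [PySem.List.pyRange_one_eq_nil (by simp)]
    simp [gLoop]
  | cons x suf ih =>
    intro pre out tmp
    have hlen : ((pre.length : Int)) < (((pre ++ x :: suf).length : Nat) : Int) := by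
      simp only [List.length_append, List.length_cons]
      push_cast
      omega
    rw [PySem.List.pyRange_one_cons hlen, List.foldl_cons]
    have hx : PySem.List.pyGetD (pre ++ x :: suf) (pre.length : Int) 0 = x := by
      rw [PySem.List.pyGetD_natCast]
      simpa using getD_append_add pre suf x 0 0
    have hih := ih (pre ++ [x])
    rw [show (pre ++ [x]) ++ suf = pre ++ x :: suf from by simp] at hih
    rw [show (((pre ++ [x]).length : Nat) : Int) = (pre.length : Int) + 1 from by simp] at hih
    cases suf with
    | nil =>
      have hc : ¬ ((pre.length : Int) < (((pre ++ [x]).length : Nat) : Int) - 1 ∧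
          PySem.List.pyGetD (pre ++ [x]) (pre.length : Int) 0 ≤
            PySem.List.pyGetD (pre ++ [x]) ((pre.length : Int) + 1) 0) := by
          intro hcc
          have h1 := hcc.1
          simp only [List.length_append, List.length_cons, List.length_nil] at h1
          push_cast at h1
          omega
      rw [show aStep (pre ++ [x]) (((pre ++ [x]).length : Nat) : Int) (out, tmp) (pre.length : Int)
            = (if (tmp ++ [x]).length > 1 then out ++ [tmp ++ [x]] else out, []) from by
          simp only [aStep]
          rw [if_neg hc, hx]]
      rw [hih]
      rw [show gLoop tmp [x] = if (tmp ++ [x]).length > 1 then [tmp ++ [x]] else [] from rfl,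
        show gLoop ([] : List Int) ([] : List Int) = [] from rfl]
      split_ifs <;> simp
    | cons y suf' =>
      have hy : PySem.List.pyGetD (pre ++ x :: y :: suf') ((pre.length : Int) + 1) 0 = y := by
          rw [show ((pre.length : Int) + 1) = ((pre.length + 1 : Nat) : Int) from by push_cast; ring]
          rw [PySem.List.pyGetD_natCast]
          simpa using getD_append_add pre (y :: suf') x 1 0
      have hc1 : (pre.length : Int) < (((pre ++ x :: y :: suf').length : Nat) : Int) - 1 := by
          simp only [List.length_append, List.length_cons]
          push_cast
          omega
      by_cases h : x ≤ y
      · rw [show aStep (pre ++ x :: y :: suf') (((pre ++ x :: y :: suf').length : Nat) : Int)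
              (out, tmp) (pre.length : Int) = (out, tmp ++ [x]) from by
            simp only [aStep]
            rw [if_pos ⟨hc1, by rw [hx, hy]; exact h⟩, hx]]
        rw [hih]
        rw [show gLoop tmp (x :: y :: suf') = gLoop (tmp ++ [x]) (y :: suf') from by simp [gLoop, h]]
      · rw [show aStep (pre ++ x :: y :: suf') (((pre ++ x :: y :: suf').length : Nat) : Int)
              (out, tmp) (pre.length : Int)
              = (if (tmp ++ [x]).length > 1 then out ++ [tmp ++ [x]] else out, []) from by
            simp only [aStep]
            rw [if_neg (by
              intro hcc
              apply h
              have h2 := hcc.2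
              rw [hx, hy] at h2
              exact h2), hx]]
        rw [hih]
        rw [show gLoop tmp (x :: y :: suf') =
            (if (tmp ++ [x]).length > 1 then [tmp ++ [x]] else []) ++ gLoop [] (y :: suf') from by
          simp [gLoop, h]]
        split_ifs <;> simp

-- Nat-level cut indices (boundary positions) and their structural recursion
def cutIdx (xs : List Int) : List Nat :=
  (List.range (xs.length - 1)).filter (fun k => decide (xs.getD (k + 1) 0 < xs.getD k 0))

def cutPos (xs : List Int) : List Nat := (cutIdx xs).map (· + 1)

theorem cutIdx_cons (x y : Int) (rest : List Int) :
    cutIdx (x :: y :: rest) = (if y < x then [0] else []) ++ (cutIdx (y :: rest)).map Nat.succ := by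
  unfold cutIdx
  rw [show (x :: y :: rest).length - 1 = rest.length + 1 from by simp]
  rw [show (y :: rest).length - 1 = rest.length from by simp]
  rw [List.range_succ_eq_map, List.filter_cons, List.filter_map]
  rw [show (fun k => decide ((x :: y :: rest).getD (k + 1) 0 < (x :: y :: rest).getD k 0)) ∘ Nat.succ
        = fun k => decide ((y :: rest).getD (k + 1) 0 < (y :: rest).getD k 0) from by
    funext k; simp]
  by_cases h : y < x <;> simp [h]

theorem cutPos_cons (x y : Int) (rest : List Int) :
    cutPos (x :: y :: rest) = (if y < x then [1] else []) ++ (cutPos (y :: rest)).map (· + 1) := by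
  unfold cutPos
  rw [cutIdx_cons]
  by_cases h : y < x <;> simp [h, List.map_map, Function.comp_def, Nat.succ_eq_add_one, Nat.add_comm]

theorem cutPos_splitRun (rest : List Int) : ∀ x, cutPos (x :: rest) =
    if (splitRun x rest).2 = [] then []
    else (splitRun x rest).1.length ::
      (cutPos (splitRun x rest).2).map (· + (splitRun x rest).1.length) := by
  induction rest with
  | nil => intro x; simp [cutPos, cutIdx, splitRun]
  | cons y rest ih =>
    intro x
    rw [cutPos_cons]
    by_cases h : x ≤ y
    · rw [if_neg (by omega), ih y]
      simp only [splitRun, if_pos h]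
      by_cases h2 : (splitRun y rest).2 = []
      · simp [h2]
      · simp [h2, List.map_map, Function.comp_def]
        intro a _
        omega
    · rw [if_pos (by omega)]
      simp [splitRun, h]

-- Nat-level segment collection
def segsN (xs : List Int) : Nat → List Nat → List (List Int)
  | _, [] => []
  | s, b :: bs => (if s + 1 < b then [(xs.drop s).take (b - s)] else []) ++ segsN xs b bs

theorem segsN_shift (bs : List Nat) : ∀ (pre xs : List Int) (s : Nat),
    segsN (pre ++ xs) (pre.length + s) (bs.map (· + pre.length)) = segsN xs s bs := by
  induction bs with
  | nil => intro pre xs s; simp [segsN]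
  | cons b bs ih =>
    intro pre xs s
    simp only [List.map_cons, segsN]
    have hdrop : (pre ++ xs).drop (pre.length + s) = xs.drop s := by
      rw [List.drop_append]
      rw [List.drop_eq_nil_of_le (by omega)]
      simp only [List.nil_append]
      congr 1
      omega
    rw [hdrop]
    rw [show b + pre.length - (pre.length + s) = b - s from by omega]
    simp only [show (pre.length + s + 1 < b + pre.length) ↔ (s + 1 < b) from by omega]
    rw [show segsN (pre ++ xs) (b + pre.length) (bs.map (· + pre.length))
          = segsN xs b bs from by rw [Nat.add_comm b pre.length]; exact ih pre xs b]

theorem bFold_eq (bs : List Nat) : ∀ (xs : List Int) (out : List (List Int)) (s : Nat),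
    ((bs.map (fun (k : Nat) => (k : Int))).foldl (bStep xs) (out, ((s : Nat) : Int))).1
      = out ++ segsN xs s bs := by
  induction bs with
  | nil => intro xs out s; simp [segsN]
  | cons b bs ih =>
    intro xs out s
    simp only [List.map_cons, List.foldl_cons]
    rw [show bStep xs (out, ((s : Nat) : Int)) ((b : Nat) : Int)
          = (if s + 1 < b then out ++ [(xs.drop s).take (b - s)] else out, ((b : Nat) : Int)) from by
      rw [show bStep xs (out, ((s : Nat) : Int)) ((b : Nat) : Int)
            = (if ((b : Int) - ((s : Nat) : Int) > 1) then
                out ++ [PySem.List.slice xs (some ((s : Nat) : Int)) (some ((b : Nat) : Int))]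
              else out, ((b : Nat) : Int)) from rfl]
      rw [PySem.List.slice_natCast]
      simp only [show ((b : Int) - ((s : Nat) : Int) > 1) ↔ (s + 1 < b) from by omega]]
    rw [ih]
    rw [show segsN xs s (b :: bs)
          = (if s + 1 < b then [(xs.drop s).take (b - s)] else []) ++ segsN xs b bs from rfl]
    split_ifs <;> simp

theorem bounds_eq (xs : List Int) :
    ((PySem.List.pyRange 0 ((xs.length : Int) - 1) 1).filter
      (fun i => decide (PySem.List.pyGetD xs (i + 1) 0 < PySem.List.pyGetD xs i 0))).map (· + 1) =
    (cutPos xs).map (fun (k : Nat) => (k : Int)) := by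
  rw [PySem.List.pyRange_one]
  rw [show (((xs.length : Int) - 1 - 0).toNat) = xs.length - 1 from by omega]
  rw [List.filter_map]
  unfold cutPos cutIdx
  simp only [List.map_map]
  rw [show (fun i => decide (PySem.List.pyGetD xs (i + 1) 0 < PySem.List.pyGetD xs i 0)) ∘
        (fun k : Nat => (0 : Int) + k) =
      fun k : Nat => decide (xs.getD (k + 1) 0 < xs.getD k 0) from by
    funext k
    simp only [Function.comp_apply]
    have h1 : ((0 : Int) + (k : Int) + 1) = ((k + 1 : Nat) : Int) := by push_cast; ring
    have h2 : ((0 : Int) + (k : Int)) = ((k : Nat) : Int) := by ring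
    rw [h1, h2, PySem.List.pyGetD_natCast, PySem.List.pyGetD_natCast]]
  apply List.map_congr_left
  intro k _
  simp only [Function.comp_apply]
  push_cast
  ring

theorem segs_eq (xs : List Int) : segsN xs 0 (cutPos xs ++ [xs.length]) = runsSpec xs := by
  induction hn : xs.length using Nat.strong_induction_on generalizing xs with
  | _ n ih =>
    subst hn
    cases xs with
    | nil => simp [cutPos, cutIdx, segsN, runsSpec]
    | cons x rest =>
      have hsp := splitRun_append rest x
      have hlen : (splitRun x rest).1.length + (splitRun x rest).2.length = rest.length + 1 := by
        have := congrArg List.length hsp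
        simpa using this
      have hle := splitRun_snd_length_le rest x
      have h1 : 1 ≤ (splitRun x rest).1.length := by omega
      rw [cutPos_splitRun rest x]
      by_cases h2 : (splitRun x rest).2 = []
      · have hx : (splitRun x rest).1 = x :: rest := by
          rw [← hsp, h2, List.append_nil]
        rw [if_pos h2]
        conv_rhs => rw [runsSpec]
        rw [h2, hx]
        simp only [List.nil_append, segsN, List.drop_zero, Nat.sub_zero, List.take_length,
          List.append_nil]
        rw [show runsSpec ([] : List Int) = [] from by rw [runsSpec]]
        simp only [show (0 + 1 < (x :: rest).length) ↔ ((x :: rest).length > 1) from by omega]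
        simp
      · rw [if_neg h2]
        conv_rhs => rw [runsSpec]
        simp only [segsN, List.cons_append]
        have htake : ((x :: rest).drop 0).take ((splitRun x rest).1.length - 0)
            = (splitRun x rest).1 := by
          rw [List.drop_zero, Nat.sub_zero, ← hsp, List.take_left]
        rw [htake]
        have hshift := segsN_shift (cutPos (splitRun x rest).2 ++ [(splitRun x rest).2.length])
          (splitRun x rest).1 (splitRun x rest).2 0
        rw [Nat.add_zero] at hshift
        have hrest : segsN (x :: rest) (splitRun x rest).1.length
            ((cutPos (splitRun x rest).2).map (· + (splitRun x rest).1.length)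
              ++ [(x :: rest).length]) = runsSpec (splitRun x rest).2 := by
          rw [show (x :: rest).length = (splitRun x rest).2.length + (splitRun x rest).1.length from by
            simp only [List.length_cons]; omega]
          rw [show (cutPos (splitRun x rest).2).map (· + (splitRun x rest).1.length) ++
                [(splitRun x rest).2.length + (splitRun x rest).1.length]
              = (cutPos (splitRun x rest).2 ++ [(splitRun x rest).2.length]).map
                  (· + (splitRun x rest).1.length) from by simp]
          rw [show (x :: rest) = (splitRun x rest).1 ++ (splitRun x rest).2 from hsp.symm]
          rw [hshift]
          exact ih (splitRun x rest).2.length (by simp only [List.length_cons]; omega)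
            (splitRun x rest).2 rfl
        rw [hrest]

theorem a_eq_runs (xs : List Int) : get_increasing_sequence xs = runsSpec xs := by
  simp only [get_increasing_sequence]
  have h := aLoop_eq xs [] [] []
  simp only [List.nil_append, List.length_nil, Nat.cast_zero] at h
  rw [h]
  cases xs with
  | nil => simp [gLoop, runsSpec]
  | cons x rest =>
    rw [gLoop_eq rest x []]
    conv_rhs => rw [runsSpec]
    simp

theorem b_eq_runs (xs : List Int) : get_increasing_sequence_alt xs = runsSpec xs := by
  simp only [get_increasing_sequence_alt]
  rw [bounds_eq]
  have h := bFold_eq (cutPos xs ++ [xs.length]) xs [] 0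
  simp only [List.map_append, List.map_cons, List.map_nil, Nat.cast_zero, List.nil_append] at h
  rw [h, segs_eq]

-- ===== VERDICT (by name: the statement is the Claim_ definition above) =====
theorem get_increasing_sequence_spec : Claim_equal_get_increasing_sequence := by
  intro xs _
  unfold Spec_get_increasing_sequence
  rw [a_eq_runs, b_eq_runs]
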